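-- pv_equiv track=rewrite | github.com/LCA-ActivityBrowser/activity-browser | activity_browser/app/bwutils/commontasks.py | clean_activity_name
-- ===== SOURCE A (Python) =====
-- def clean_activity_name(activity_name: str) -> str:
--     """ Takes a given activity name and remove or replace all characters
--     not allowed to be in there.
--
--     Use this when creating parameters, as there are specific characters not
--     allowed to be in parameter names.
--
--     These are ' -,.%[]' and all integers
--     """
--     remove = ",.%[]0123456789"
--     replace = " -"
--     for char in remove:
--         if char in activity_name:
--             activity_name = activity_name.replace(char, "")
--     for char in replace:
--         if char in activity_name:
--             activity_name = activity_name.replace(char, "_")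
--     return activity_name
-- ===== SOURCE B (Python) =====
-- def clean_activity_name(activity_name: str) -> str:
--     """One pass: classify each character as removed, replaced by '_', or kept."""
--     remove = set(",.%[]0123456789")
--     replace = set(" -")
--     out = []
--     for ch in activity_name:
--         if ch in remove:
--             continue
--         if ch in replace:
--             out.append("_")
--         else:
--             out.append(ch)
--     return "".join(out)
-- ===== Notes on version B (the rewrite author's own statement) =====
-- stated objective: alternative
-- what changed: Replaces A's fourteen whole-string scan-and-replace passes with a single pass that classifies each character (drop / '_' / keep) against two fixed sets and joins the result.
import Mathlib
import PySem

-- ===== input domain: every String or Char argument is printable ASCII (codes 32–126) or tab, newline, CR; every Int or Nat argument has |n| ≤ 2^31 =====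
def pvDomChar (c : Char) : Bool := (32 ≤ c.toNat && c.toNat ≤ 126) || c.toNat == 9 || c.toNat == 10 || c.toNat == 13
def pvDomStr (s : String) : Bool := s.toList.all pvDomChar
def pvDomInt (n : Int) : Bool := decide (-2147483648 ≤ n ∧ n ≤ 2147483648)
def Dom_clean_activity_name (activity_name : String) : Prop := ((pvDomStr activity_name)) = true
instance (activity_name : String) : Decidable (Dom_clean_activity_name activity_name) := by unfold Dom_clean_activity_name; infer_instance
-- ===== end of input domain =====

-- B replaces A's fourteen scan-and-replace passes over the whole string by a single
-- per-character classification pass (drop / '_' / keep); an alternative one-pass algorithm.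

-- ===== PORT A =====
-- for char in remove: if char in activity_name: activity_name = activity_name.replace(char, "")
-- for char in replace: if char in activity_name: activity_name = activity_name.replace(char, "_")
def clean_activity_name (activity_name : String) : String :=
  let remove : List Char := [',', '.', '%', '[', ']', '0', '1', '2', '3', '4', '5', '6', '7', '8', '9']
  let rep : List Char := [' ', '-']
  let s1 := remove.foldl (fun acc c =>
    if PySem.Str.isIn (String.ofList [c]) acc then PySem.Str.replace acc (String.ofList [c]) "" else acc) activity_name
  rep.foldl (fun acc c =>
    if PySem.Str.isIn (String.ofList [c]) acc then PySem.Str.replace acc (String.ofList [c]) "_" else acc) s1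

-- ===== PORT B =====
-- single pass over the characters: skip if in remove, append '_' if in replace, else keep
def pvRemoveSet : List Char := [',', '.', '%', '[', ']', '0', '1', '2', '3', '4', '5', '6', '7', '8', '9']
def pvReplaceSet : List Char := [' ', '-']

def pvCleanGo : List Char → List Char
  | [] => []
  | c :: rest =>
    if c ∈ pvRemoveSet then pvCleanGo rest
    else if c ∈ pvReplaceSet then '_' :: pvCleanGo rest
    else c :: pvCleanGo rest

def clean_activity_name_alt (activity_name : String) : String :=
  String.ofList (pvCleanGo activity_name.toList)

-- ===== PRECONDITION & SPEC =====
def Spec_clean_activity_name (activity_name : String) (out : String) : Prop := out = clean_activity_name_alt activity_name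
instance (activity_name : String) (out : String) : Decidable (Spec_clean_activity_name activity_name out) := by unfold Spec_clean_activity_name; infer_instance

-- ===== CLAIM (what is proved, stated in full; the proofs are below) =====
def Claim_equal_clean_activity_name : Prop := ∀ (activity_name : String), Dom_clean_activity_name activity_name → Spec_clean_activity_name activity_name (clean_activity_name activity_name)

-- ===== LEMMAS AND PROOFS =====

-- B's classification, per character
def pvClass (c : Char) : List Char :=
  if c ∈ pvRemoveSet then [] else if c ∈ pvReplaceSet then ['_'] else [c]

-- replace with a single-char pattern acts pointwise on the characters
lemma replace_go_single (c : Char) (new : List Char) :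
    ∀ (fuel : Nat) (l acc : List Char), l.length ≤ fuel →
      PySem.Chars.replace.go [c] new fuel l acc
        = acc.reverse ++ l.flatMap (fun x => if x = c then new else [x]) := by
  intro fuel
  induction fuel with
  | zero =>
    intro l acc h
    have : l = [] := List.length_eq_zero_iff.mp (Nat.le_zero.mp h)
    subst this
    simp [PySem.Chars.replace.go]
  | succ n ih =>
    intro l acc h
    cases l with
    | nil => simp [PySem.Chars.replace.go]
    | cons x t =>
      by_cases hx : x = c
      · subst hx
        have hpre : List.isPrefixOf [x] (x :: t) = true := by simp [List.isPrefixOf]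
        simp only [PySem.Chars.replace.go, hpre, if_true]
        rw [ih _ _ (by simpa using Nat.le_of_succ_le_succ h)]
        simp
      · have hpre : List.isPrefixOf [c] (x :: t) = false := by
          simp [List.isPrefixOf]
          intro h'; exact absurd h'.symm hx
        simp only [PySem.Chars.replace.go, hpre, Bool.false_eq_true, if_false]
        rw [ih _ _ (by simpa using Nat.le_of_succ_le_succ h)]
        simp [hx]

lemma replace_single (s : List Char) (c : Char) (new : List Char) :
    PySem.Chars.replace s [c] new = s.flatMap (fun x => if x = c then new else [x]) := by
  unfold PySem.Chars.replace
  simp only [List.isEmpty_cons, Bool.false_eq_true, if_false]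
  simpa using replace_go_single c new s.length s [] (le_refl _)

-- when c ∉ s the pointwise pass is the identity (A's 'if char in s' guard is immaterial)
lemma flatMap_id_of_not_mem (s : List Char) (c : Char) (new : List Char) (h : c ∉ s) :
    s.flatMap (fun x => if x = c then new else [x]) = s := by
  induction s with
  | nil => simp
  | cons x t ih =>
    have hx : x ≠ c := fun e => h (e ▸ List.mem_cons_self ..)
    simp only [List.flatMap_cons, if_neg hx]
    rw [ih (fun hm => h (List.mem_cons_of_mem _ hm))]
    rfl

-- one step of A's loop, on the character-list level
lemma step_eq (s : List Char) (c : Char) (new : String) :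
    (if PySem.Str.isIn (String.ofList [c]) (String.ofList s) then
        PySem.Str.replace (String.ofList s) (String.ofList [c]) new
      else String.ofList s)
      = String.ofList (s.flatMap (fun x => if x = c then new.toList else [x])) := by
  by_cases h : PySem.Str.isIn (String.ofList [c]) (String.ofList s) = true
  · rw [if_pos h]
    unfold PySem.Str.replace
    congr 1
    simpa using replace_single s c new.toList
  · rw [if_neg h]
    have hnm : c ∉ s := by
      intro hc
      exact h (by rw [PySem.Str.isIn_iff_infix]; simpa using (List.singleton_infix_iff c s).mpr hc)
    rw [flatMap_id_of_not_mem s c new.toList hnm]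

-- the fused per-character function of A's seventeen passes equals B's classification
lemma pipeline_char_eq (c : Char) :
    ((if c = ',' then ([]:List Char) else [c])
      |>.flatMap (fun x => if x = '.' then [] else [x])
      |>.flatMap (fun x => if x = '%' then [] else [x])
      |>.flatMap (fun x => if x = '[' then [] else [x])
      |>.flatMap (fun x => if x = ']' then [] else [x])
      |>.flatMap (fun x => if x = '0' then [] else [x])
      |>.flatMap (fun x => if x = '1' then [] else [x])
      |>.flatMap (fun x => if x = '2' then [] else [x])
      |>.flatMap (fun x => if x = '3' then [] else [x])
      |>.flatMap (fun x => if x = '4' then [] else [x])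
      |>.flatMap (fun x => if x = '5' then [] else [x])
      |>.flatMap (fun x => if x = '6' then [] else [x])
      |>.flatMap (fun x => if x = '7' then [] else [x])
      |>.flatMap (fun x => if x = '8' then [] else [x])
      |>.flatMap (fun x => if x = '9' then [] else [x])
      |>.flatMap (fun x => if x = ' ' then ['_'] else [x])
      |>.flatMap (fun x => if x = '-' then ['_'] else [x]))
      = pvClass c := by
  by_cases h1 : c = ','; · subst h1; decide
  by_cases h2 : c = '.'; · subst h2; decide
  by_cases h3 : c = '%'; · subst h3; decide
  by_cases h4 : c = '['; · subst h4; decide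
  by_cases h5 : c = ']'; · subst h5; decide
  by_cases h6 : c = '0'; · subst h6; decide
  by_cases h7 : c = '1'; · subst h7; decide
  by_cases h8 : c = '2'; · subst h8; decide
  by_cases h9 : c = '3'; · subst h9; decide
  by_cases h10 : c = '4'; · subst h10; decide
  by_cases h11 : c = '5'; · subst h11; decide
  by_cases h12 : c = '6'; · subst h12; decide
  by_cases h13 : c = '7'; · subst h13; decide
  by_cases h14 : c = '8'; · subst h14; decide
  by_cases h15 : c = '9'; · subst h15; decide
  by_cases h16 : c = ' '; · subst h16; decide
  by_cases h17 : c = '-'; · subst h17; decide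
  simp [pvClass, pvRemoveSet, pvReplaceSet,
    h1, h2, h3, h4, h5, h6, h7, h8, h9, h10, h11, h12, h13, h14, h15, h16, h17]

lemma pipeline_eq (l : List Char) :
    (l.flatMap (fun x => if x = ',' then [] else [x])
      |>.flatMap (fun x => if x = '.' then [] else [x])
      |>.flatMap (fun x => if x = '%' then [] else [x])
      |>.flatMap (fun x => if x = '[' then [] else [x])
      |>.flatMap (fun x => if x = ']' then [] else [x])
      |>.flatMap (fun x => if x = '0' then [] else [x])
      |>.flatMap (fun x => if x = '1' then [] else [x])
      |>.flatMap (fun x => if x = '2' then [] else [x])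
      |>.flatMap (fun x => if x = '3' then [] else [x])
      |>.flatMap (fun x => if x = '4' then [] else [x])
      |>.flatMap (fun x => if x = '5' then [] else [x])
      |>.flatMap (fun x => if x = '6' then [] else [x])
      |>.flatMap (fun x => if x = '7' then [] else [x])
      |>.flatMap (fun x => if x = '8' then [] else [x])
      |>.flatMap (fun x => if x = '9' then [] else [x])
      |>.flatMap (fun x => if x = ' ' then ['_'] else [x])
      |>.flatMap (fun x => if x = '-' then ['_'] else [x]))
      = pvCleanGo l := by
  induction l with
  | nil => simp [pvCleanGo]
  | cons c t ih =>
    simp only [List.flatMap_cons, List.flatMap_append]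
    rw [ih, pipeline_char_eq]
    simp only [pvCleanGo]
    unfold pvClass
    split_ifs <;> simp

-- A's whole loop, for any list of single-char patterns, moved to the character-list level
lemma foldA_eq (cs : List Char) (new : String) :
    ∀ l : List Char,
      cs.foldl (fun acc c =>
          if PySem.Str.isIn (String.ofList [c]) acc then
            PySem.Str.replace acc (String.ofList [c]) new else acc) (String.ofList l)
        = String.ofList (cs.foldl
            (fun acc c => acc.flatMap (fun x => if x = c then new.toList else [x])) l) := by
  induction cs with
  | nil => intro l; rfl
  | cons c t ih =>
    intro l
    rw [List.foldl_cons, step_eq, List.foldl_cons]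
    exact ih _

-- ===== VERDICT (by name: the statement is the Claim_ definition above) =====
theorem clean_activity_name_spec : Claim_equal_clean_activity_name := by
  intro s _
  unfold Spec_clean_activity_name clean_activity_name clean_activity_name_alt
  obtain ⟨l, rfl⟩ : ∃ l, s = String.ofList l := ⟨s.toList, String.ofList_toList.symm⟩
  dsimp only
  rw [foldA_eq [',', '.', '%', '[', ']', '0', '1', '2', '3', '4', '5', '6', '7', '8', '9'] "" l]
  rw [foldA_eq [' ', '-'] "_"]
  rw [String.toList_ofList]
  refine congrArg String.ofList ?_
  simp only [List.foldl_cons, List.foldl_nil, String.toList_ofList,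
    show "".toList = ([] : List Char) from rfl]
  exact pipeline_eq l
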